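-- pv_equiv track=rewrite | github.com/stdgy/AdventOfCode | 2016/days/4/solution.py | sort_frequencies
-- ===== SOURCE A (Python) =====
-- def sort_frequencies(freqs):
--     """
--     :type freqs: dict
--     :rtype: list
--     Returns a list of keys sorted by value
--     """
--     letters = list(freqs.keys())
--     letters.sort()
--     combined_vals = []
--     for letter in letters:
--         combined_vals.append({
--             'key': letter,
--             'val': freqs[letter]
--         })
--
--     combined_vals.sort(key=lambda v: v.get('val'), reverse=True)
--     sorted_keys = list(map(lambda v: v.get('key'), combined_vals))
--     return sorted_keys
-- ===== SOURCE B (Python) =====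
-- def sort_frequencies(freqs):
--     """
--     :type freqs: dict
--     :rtype: list
--     Returns a list of keys sorted by value
--     """
--     buckets = {}
--     for key, val in freqs.items():
--         buckets.setdefault(val, []).append(key)
--     result = []
--     for val in sorted(buckets, reverse=True):
--         result.extend(sorted(buckets[val]))
--     return result
-- ===== Notes on version B (the rewrite author's own statement) =====
-- stated objective: alternative
-- what changed: B replaces A's build-records-then-two-full-sorts pipeline with a value->keys bucket index built in one pass, emitting distinct values in descending order with each bucket sorted alphabetically.
import Mathlib
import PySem

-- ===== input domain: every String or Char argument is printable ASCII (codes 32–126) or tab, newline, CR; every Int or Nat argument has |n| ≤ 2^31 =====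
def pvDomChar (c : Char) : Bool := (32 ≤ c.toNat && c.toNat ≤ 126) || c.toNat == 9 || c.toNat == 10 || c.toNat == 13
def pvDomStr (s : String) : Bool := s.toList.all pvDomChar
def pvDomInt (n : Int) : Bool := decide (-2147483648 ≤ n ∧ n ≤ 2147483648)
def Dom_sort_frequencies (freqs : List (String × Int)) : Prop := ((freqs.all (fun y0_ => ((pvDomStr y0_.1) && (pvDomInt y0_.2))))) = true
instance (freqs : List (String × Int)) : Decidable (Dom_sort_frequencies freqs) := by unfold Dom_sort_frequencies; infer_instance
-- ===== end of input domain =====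

-- B buckets the keys by value and emits the buckets in descending value order (each sorted
-- alphabetically) instead of A's record list with two full sorts; objective: alternative decomposition.

-- ===== PORT A =====
-- the dict parameter arrives as an association list; Dict.ofList rebuilds the Python dict
def sort_frequencies (freqs : List (String × Int)) : List String :=
  let d := PySem.Dict.ofList freqs
  let letters := PySem.List.sorted d.keys (fun x => x)
  -- for letter in letters: combined_vals.append({'key': letter, 'val': freqs[letter]})
  -- (letter is a key of d, so freqs[letter] never raises; getD's default is unreachable)
  let combined_vals := letters.foldl (fun acc letter => acc ++ [(letter, d.getD letter 0)]) []
  let sorted_vals := PySem.List.sorted combined_vals (fun v => v.2) true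
  sorted_vals.map (fun v => v.1)

-- ===== PORT B =====
def sort_frequencies_alt (freqs : List (String × Int)) : List String :=
  let d := PySem.Dict.ofList freqs
  -- for key, val in freqs.items(): buckets.setdefault(val, []).append(key)
  let buckets := d.items.foldl (fun b kv => b.modify kv.2 [] (fun ks => ks ++ [kv.1])) PySem.Dict.empty
  -- for val in sorted(buckets, reverse=True): result.extend(sorted(buckets[val]))
  -- (val is a key of buckets, so buckets[val] never raises; getD's default is unreachable)
  (PySem.List.sorted buckets.keys (fun v => v) true).foldl
    (fun acc v => acc ++ PySem.List.sorted (buckets.getD v []) (fun k => k)) []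

-- ===== PRECONDITION & SPEC =====
def Spec_sort_frequencies (freqs : List (String × Int)) (out : List String) : Prop := out = sort_frequencies_alt freqs
instance (freqs : List (String × Int)) (out : List String) : Decidable (Spec_sort_frequencies freqs out) := by unfold Spec_sort_frequencies; infer_instance

-- ===== CLAIM (what is proved, stated in full; the proofs are below) =====
def Claim_equal_sort_frequencies : Prop := ∀ (freqs : List (String × Int)), Dom_sort_frequencies freqs → Spec_sort_frequencies freqs (sort_frequencies freqs)

-- ===== LEMMAS AND PROOFS =====

theorem flatMap_singleton_map {α β : Type} (g : α → β) (l : List α) :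
    l.flatMap (fun x => [g x]) = l.map g := by
  induction l with
  | nil => rfl
  | cons a t ih => simp [ih]

-- insertBy walks past a prefix it does not go before
theorem insertBy_append_not_before {α : Type} (before : α → α → Bool) (x : α) (ys zs : List α)
    (h : ∀ y ∈ ys, before x y = false) :
    PySem.List.insertBy before x (ys ++ zs) = ys ++ PySem.List.insertBy before x zs := by
  induction ys with
  | nil => simp
  | cons y ys ih =>
    have hy : before x y = false := h y (by simp)
    simp only [List.cons_append, PySem.List.insertBy, hy, Bool.false_eq_true, if_false]
    simp [ih (fun y hy => h y (by simp [hy]))]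

-- insertBy goes in front of a list it goes before everywhere
theorem insertBy_all_before {α : Type} (before : α → α → Bool) (x : α) (zs : List α)
    (h : ∀ z ∈ zs, before x z = true) :
    PySem.List.insertBy before x zs = x :: zs := by
  cases zs with
  | nil => simp [PySem.List.insertBy]
  | cons z zs => simp [PySem.List.insertBy, h z (by simp)]

theorem insertBy_mid (x : String × Int) (ys zs : List (String × Int))
    (hys : ∀ y ∈ ys, ¬ (y.2 < x.2)) (hzs : ∀ z ∈ zs, z.2 < x.2) :
    PySem.List.insertBy (fun a b => decide (b.2 < a.2)) x (ys ++ zs) = ys ++ x :: zs := by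
  rw [insertBy_append_not_before _ _ _ _ (fun y hy => by simpa using hys y hy),
      insertBy_all_before _ _ _ (fun z hz => by simpa using hzs z hz)]

-- sorted(-, reverse=True) of xs ++ [x] inserts x into sorted(xs, reverse=True)
theorem sorted_rev_append_singleton {α κ : Type} [LT κ] [DecidableLT κ] (xs : List α) (x : α) (key : α → κ) :
    PySem.List.sorted (xs ++ [x]) key true
      = PySem.List.insertBy (fun a b => decide (key b < key a)) x (PySem.List.sorted xs key true) := by
  rw [PySem.List.sorted_rev_eq_foldl_insertBy, PySem.List.sorted_rev_eq_foldl_insertBy, List.foldl_append]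
  rfl

-- sorted(set, reverse=True) on a Nodup set is strictly decreasing
theorem sorted_rev_strict (s : List Int) (h : s.Nodup) :
    (PySem.List.sorted s (fun v => v) true).Pairwise (fun a b => b < a) := by
  have hle := PySem.List.sorted_pairwise_rev s (fun v => v)
  have hnd : (PySem.List.sorted s (fun v => v) true).Nodup :=
    ((PySem.List.sorted_perm s (fun v => v) true).nodup_iff).mpr h
  have := hle.and hnd
  exact this.imp (fun {a b} hab => lt_of_le_of_ne hab.1 (fun hba => hab.2 hba.symm))

theorem lt_of_mem_dropWhile_strict (vs : List Int) (c : Int)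
    (hp : vs.Pairwise (fun a b => b < a)) (hc : c ∉ vs) :
    ∀ b ∈ vs.dropWhile (fun v => decide (c < v)), b < c := by
  induction vs with
  | nil => simp
  | cons v vs ih =>
    intro b hb
    by_cases hcv : c < v
    · rw [List.dropWhile_cons_of_pos (by simpa using hcv)] at hb
      exact ih hp.of_cons (fun h => hc (by simp [h])) b hb
    · rw [List.dropWhile_cons_of_neg (by simpa using hcv)] at hb
      rcases List.mem_cons.mp hb with rfl | hb
      · exact lt_of_le_of_ne (not_lt.mp hcv) (fun h => hc (by simp [h]))
      · exact lt_trans (List.rel_of_pairwise_cons hp hb) (lt_of_le_of_ne (not_lt.mp hcv) (fun h => hc (by simp [h])))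

-- KEY LEMMA: Python's stable reverse sort by a key = the key values in descending order,
-- each group listed in original order
theorem sorted_rev_group (L : List (String × Int)) :
    PySem.List.sorted L (fun v => v.2) true
      = (PySem.List.sorted (PySem.Set.ofList (L.map (fun v => v.2))) (fun v => v) true).flatMap
          (fun v => L.filter (fun a => a.2 == v)) := by
  induction L using List.reverseRecOn with
  | nil => simp [PySem.List.sorted]
  | append_singleton L x ih =>
    have hS : (PySem.Set.ofList (L.map (fun v => v.2))).Nodup := PySem.Set.nodup_ofList _
    set S := PySem.Set.ofList (L.map (fun v => v.2)) with hSdef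
    set vs := PySem.List.sorted S (fun v => v) true with hvs
    have hvsnd : vs.Nodup := ((PySem.List.sorted_perm S (fun v => v) true).nodup_iff).mpr hS
    have hvsstrict : vs.Pairwise (fun a b => b < a) := sorted_rev_strict S hS
    have hvsperm : vs.Perm S := PySem.List.sorted_perm S (fun v => v) true
    have hmapped : (L ++ [x]).map (fun v => v.2) = L.map (fun v => v.2) ++ [x.2] := by simp
    -- decompose the new sorted value list as bigger ++ x.2 :: smaller
    obtain ⟨bigger, smaller, hdec, hbig, hsm, hold⟩ :
        ∃ bigger smaller,
          PySem.List.sorted (PySem.Set.ofList ((L ++ [x]).map (fun v => v.2))) (fun v => v) true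
              = bigger ++ x.2 :: smaller ∧
          (∀ v ∈ bigger, x.2 < v) ∧ (∀ v ∈ smaller, v < x.2) ∧
          (vs = bigger ++ smaller ∨ vs = bigger ++ x.2 :: smaller) := by
      rw [hmapped, PySem.Set.ofList_append_singleton, ← hSdef]
      by_cases hmem : x.2 ∈ S
      · -- value already present: the sorted value list is unchanged
        rw [PySem.Set.add_of_mem hmem, ← hvs]
        have hmemvs : x.2 ∈ vs := hvsperm.mem_iff.mpr hmem
        obtain ⟨bigger, smaller, hsplit⟩ := List.append_of_mem hmemvs
        refine ⟨bigger, smaller, hsplit, ?_, ?_, Or.inr hsplit⟩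
        · intro v hv
          have := (List.pairwise_append.mp (hsplit ▸ hvsstrict)).2.2 v hv x.2 (by simp)
          exact this
        · intro v hv
          have := List.rel_of_pairwise_cons (List.pairwise_append.mp (hsplit ▸ hvsstrict)).2.1 hv
          exact this
      · -- fresh value: it is inserted between the larger and the smaller values
        rw [PySem.Set.add_of_not_mem hmem]
        have hnvs : x.2 ∉ vs := fun h => hmem (hvsperm.mem_iff.mp h)
        have hbig' : ∀ v ∈ vs.takeWhile (fun v => decide (x.2 < v)), x.2 < v := by
          intro v hv; simpa using List.mem_takeWhile_imp hv
        have hsm' := lt_of_mem_dropWhile_strict vs x.2 hvsstrict hnvs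
        have hperm : (vs.takeWhile (fun v => decide (x.2 < v))
            ++ x.2 :: vs.dropWhile (fun v => decide (x.2 < v))).Perm (S ++ [x.2]) := by
          have h1 := List.perm_middle (a := x.2)
            (l₁ := vs.takeWhile (fun v => decide (x.2 < v)))
            (l₂ := vs.dropWhile (fun v => decide (x.2 < v)))
          rw [List.takeWhile_append_dropWhile] at h1
          exact (h1.trans (hvsperm.cons x.2)).trans (List.perm_append_singleton _ _).symm
        have hpw : (vs.takeWhile (fun v => decide (x.2 < v))
            ++ x.2 :: vs.dropWhile (fun v => decide (x.2 < v))).Pairwise (fun a b => b < a) := by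
          rw [List.pairwise_append]
          refine ⟨List.Pairwise.sublist (List.takeWhile_sublist _) hvsstrict, ?_, ?_⟩
          · rw [List.pairwise_cons]
            exact ⟨hsm', List.Pairwise.sublist (List.dropWhile_sublist _) hvsstrict⟩
          · intro a ha b hb
            have hxa : x.2 < a := hbig' a ha
            rcases List.mem_cons.mp hb with rfl | hb
            · exact hxa
            · exact lt_trans (hsm' b hb) hxa
        exact ⟨_, _, PySem.List.sorted_rev_eq_of_perm_of_pairwise_gt _ _ _ hperm hpw, hbig', hsm',
          Or.inl (List.takeWhile_append_dropWhile).symm⟩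
    rw [sorted_rev_append_singleton, ih, hdec]
    -- the old group concatenation, regrouped around x.2
    have hkey : ∀ (part : List Int) y, y ∈ part.flatMap (fun v => L.filter (fun a => a.2 == v)) →
        y.2 ∈ part := by
      intro part y hy
      simp only [List.mem_flatMap, List.mem_filter] at hy
      obtain ⟨v, hv, _, he⟩ := hy
      rwa [beq_iff_eq.mp he]
    have hnew : ∀ v, (L ++ [x]).filter (fun a => a.2 == v)
        = L.filter (fun a => a.2 == v) ++ (if x.2 = v then [x] else []) := by
      intro v
      rw [List.filter_append]
      congr 1
      by_cases h : x.2 = v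
      · simp [List.filter, h]
      · have hb : (x.2 == v) = false := beq_eq_false_iff_ne.mpr h
        simp [List.filter, hb]
        exact h
    rcases hold with hvseq | hvseq
    · -- fresh value: old list has no x.2 group
      have hgx : L.filter (fun a => a.2 == x.2) = [] := by
        rw [List.filter_eq_nil_iff]
        intro a ha he
        have : a.2 ∈ S := by rw [hSdef]; exact (PySem.Set.mem_ofList _ _).mpr (List.mem_map_of_mem ha)
        rw [beq_iff_eq.mp he] at this
        exact absurd this (by
          intro hmem
          have : x.2 ∈ vs := hvsperm.mem_iff.mpr hmem
          rw [hvseq] at this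
          rcases List.mem_append.mp this with h | h
          · exact absurd (hbig _ h) (lt_irrefl _)
          · exact absurd (hsm _ h) (lt_irrefl _))
      rw [hvseq, List.flatMap_append, insertBy_mid]
      · simp only [List.flatMap_append, List.flatMap_cons]
        congr 1
        · apply List.flatMap_congr; intro v hv
          rw [hnew v, if_neg (fun h => absurd (h ▸ hbig v hv) (lt_irrefl _))]; simp
        · rw [hnew x.2, if_pos rfl, hgx]
          simp only [List.nil_append, List.cons_append]
          congr 1
          apply List.flatMap_congr; intro v hv
          rw [hnew v, if_neg (fun h => absurd (h ▸ hsm v hv) (lt_irrefl _))]; simp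
      · intro y hy; exact not_lt.mpr (le_of_lt (hbig _ (hkey _ _ hy)))
      · intro z hz; exact hsm _ (hkey _ _ hz)
    · -- present value: x joins the end of its group
      rw [hvseq]
      have hsplit2 : (bigger ++ x.2 :: smaller).flatMap (fun v => L.filter (fun a => a.2 == v))
          = (bigger.flatMap (fun v => L.filter (fun a => a.2 == v)) ++ L.filter (fun a => a.2 == x.2))
            ++ smaller.flatMap (fun v => L.filter (fun a => a.2 == v)) := by
        simp [List.flatMap_append]
      rw [hsplit2, insertBy_mid]
      · simp only [List.flatMap_append, List.flatMap_cons]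
        rw [List.append_assoc]
        congr 1
        · apply List.flatMap_congr; intro v hv
          rw [hnew v, if_neg (fun h => absurd (h ▸ hbig v hv) (lt_irrefl _))]; simp
        · rw [hnew x.2, if_pos rfl]
          simp only [List.append_assoc, List.cons_append, List.nil_append]
          congr 2
          apply List.flatMap_congr; intro v hv
          rw [hnew v, if_neg (fun h => absurd (h ▸ hsm v hv) (lt_irrefl _))]; simp
      · intro y hy
        rcases List.mem_append.mp hy with h | h
        · exact not_lt.mpr (le_of_lt (hbig _ (hkey _ _ h)))
        · have : y.2 = x.2 := by simpa [beq_iff_eq] using (List.mem_filter.mp h).2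
          simp [this]
      · intro z hz; exact hsm _ (hkey _ _ hz)

-- the bucket-building loop of B: each bucket is the keys with that value, in item order
theorem bucket_getD (l : List (String × Int)) (b : PySem.Dict Int (List String)) (v : Int) :
    (l.foldl (fun b kv => b.modify kv.2 [] (fun ks => ks ++ [kv.1])) b).getD v []
      = b.getD v [] ++ (l.filter (fun kv => kv.2 == v)).map (fun kv => kv.1) := by
  induction l generalizing b with
  | nil => simp
  | cons kv l ih =>
    simp only [List.foldl_cons, ih, List.filter_cons]
    rw [PySem.Dict.getD_modify]
    by_cases h : v = kv.2
    · have hb : (kv.2 == v) = true := by simp [h]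
      rw [if_pos h, hb, h]
      simp
    · have hb : (kv.2 == v) = false := beq_eq_false_iff_ne.mpr (fun he => h he.symm)
      rw [if_neg h, hb]
      simp

-- sorted(set(xs), reverse=True) only depends on xs up to permutation
theorem sorted_rev_ofList_perm (xs ys : List Int) (h : xs.Perm ys) :
    PySem.List.sorted (PySem.Set.ofList xs) (fun v => v) true
      = PySem.List.sorted (PySem.Set.ofList ys) (fun v => v) true := by
  apply PySem.List.sorted_rev_eq_of_perm_of_pairwise_gt
  · apply (PySem.List.sorted_perm _ _ _).trans
    rw [List.perm_ext_iff_of_nodup (PySem.Set.nodup_ofList _) (PySem.Set.nodup_ofList _)]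
    intro a
    rw [PySem.Set.mem_ofList, PySem.Set.mem_ofList]
    exact ⟨fun ha => h.symm.mem_iff.mp ha, fun ha => h.mem_iff.mp ha⟩
  · exact sorted_rev_strict _ (PySem.Set.nodup_ofList _)

-- ===== VERDICT (by name: the statement is the Claim_ definition above) =====
theorem sort_frequencies_spec : Claim_equal_sort_frequencies := by
  intro freqs _
  unfold Spec_sort_frequencies sort_frequencies sort_frequencies_alt
  dsimp only
  set d := PySem.Dict.ofList freqs with hd
  have hnd : d.keys.Nodup := PySem.Dict.nodup_keys_ofList freqs
  set f : String → Int := fun k => d.getD k 0 with hf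
  set letters := PySem.List.sorted d.keys (fun x => x) with hletters
  have hlperm : letters.Perm d.keys := PySem.List.sorted_perm _ _ _
  have hlnd : letters.Nodup := hlperm.nodup_iff.mpr hnd
  have hlstrict : letters.Pairwise (fun a b => a < b) := by
    have hle := PySem.List.sorted_pairwise d.keys (fun x => x)
    exact (hle.and hlnd).imp (fun {a b} hab => lt_of_le_of_ne hab.1 hab.2)
  -- A side: combined_vals is letters paired with values
  have hcomb : letters.foldl (fun acc letter => acc ++ [(letter, d.getD letter 0)]) []
      = letters.map (fun l => (l, f l)) := by
    rw [PySem.List.foldl_append_eq_flatMap]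
    simp only [List.nil_append]
    exact flatMap_singleton_map _ _
  rw [hcomb, sorted_rev_group, List.map_flatMap]
  -- B side: buckets
  set buckets := d.items.foldl (fun b kv => b.modify kv.2 [] (fun ks => ks ++ [kv.1])) PySem.Dict.empty
    with hbuckets
  have hitems : d.items = d.keys.map (fun k => (k, f k)) := PySem.Dict.items_eq_map_keys d hnd 0
  have hbkeys : buckets.keys = PySem.Set.ofList (d.items.map (fun kv => kv.2)) := by
    rw [hbuckets, PySem.Dict.keys_foldl_modify_key d.items (fun kv => kv.2) [] (fun b kv => (fun ks => ks ++ [kv.1]))]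
    simp [PySem.Dict.keys, PySem.Dict.empty, PySem.Set.update_nil_left]
  rw [PySem.List.foldl_append_eq_flatMap, List.nil_append, hbkeys]
  -- the two sorted value lists agree
  have hvals : PySem.List.sorted (PySem.Set.ofList ((letters.map (fun l => (l, f l))).map (fun v => v.2))) (fun v => v) true
      = PySem.List.sorted (PySem.Set.ofList (d.items.map (fun kv => kv.2))) (fun v => v) true := by
    apply sorted_rev_ofList_perm
    rw [hitems]
    simp only [List.map_map]
    exact hlperm.map _
  rw [hvals]
  -- the two groups agree for every value
  apply List.flatMap_congr
  intro v _
  have hAgroup : ((letters.map (fun l => (l, f l))).filter (fun a => a.2 == v)).map (fun v => v.1)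
      = letters.filter (fun l => f l == v) := by
    rw [List.filter_map, List.map_map]
    simp [Function.comp_def]
  rw [hAgroup, bucket_getD]
  have hBgroup : (PySem.Dict.empty : PySem.Dict Int (List String)).getD v []
      ++ (d.items.filter (fun kv => kv.2 == v)).map (fun kv => kv.1)
      = d.keys.filter (fun k => f k == v) := by
    rw [PySem.Dict.getD_empty, List.nil_append, hitems, List.filter_map, List.map_map]
    simp [Function.comp_def]
  rw [hBgroup]
  symm
  apply PySem.List.sorted_eq_of_perm_of_pairwise_lt
  · exact (hlperm.filter _).symm.symm
  · exact hlstrict.filter _
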